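-- pv_equiv track=rewrite | github.com/pratikguragain10/Company-Master | plotting-logic/grouped_bar_plot.py | aggregate_top_activities
-- ===== SOURCE A (Python) =====
-- from collections import defaultdict, Counter
--
-- def aggregate_top_activities(counts, max_year, top_n=5, last_years=10):
--     """Aggregate counts for top N activities in the last M years."""
--     start_year = max_year - last_years + 1
--     activity_totals = Counter()
--
--     for (year, activity), count in counts.items():
--         if start_year <= year <= max_year:
--             activity_totals[activity] += count
--
--     top_activities = [act for act, _ in activity_totals.most_common(top_n)]
--     years = list(range(start_year, max_year + 1))
--     data_matrix = [[counts.get((year, activity), 0) for year in years]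
--                    for activity in top_activities]
--
--     return years, top_activities, data_matrix
-- ===== SOURCE B (Python) =====
-- def aggregate_top_activities(counts, max_year, top_n=5, last_years=10):
--     """Aggregate counts for top N activities in the last M years."""
--     start_year = max_year - last_years + 1
--     years = list(range(start_year, max_year + 1))
--     # candidate activities, in order of first in-window appearance
--     acts = []
--     seen = set()
--     for (year, activity) in counts:
--         if start_year <= year <= max_year and activity not in seen:
--             seen.add(activity)
--             acts.append(activity)
--     # materialise every candidate row up front; totals are the row sums
--     rows = [[counts.get((year, activity), 0) for year in years] for activity in acts]
--     totals = [sum(row) for row in rows]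
--     # selection: repeatedly extract the first remaining candidate with the largest total
--     pool = list(zip(acts, totals, rows))
--     top_activities = []
--     data_matrix = []
--     while pool and len(top_activities) < top_n:
--         best = pool[0]
--         for cand in pool[1:]:
--             if best[1] < cand[1]:
--                 best = cand
--         top_activities.append(best[0])
--         data_matrix.append(list(best[2]))
--         pool.remove(best)
--     return years, top_activities, data_matrix
-- ===== Notes on version B (the rewrite author's own statement) =====
-- stated objective: alternative
-- what changed: Inverts A's dataflow: instead of aggregating a Counter and then building the matrix for the sorted top-n, B first lists the in-window activities by ordered dedup, materialises every candidate's year-row up front, derives totals as row sums (no aggregation pass over the items), and then picks the top n by repeated first-argmax extraction (selection) from the (activity,total,row) pool instead of sorting.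
import Mathlib
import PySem

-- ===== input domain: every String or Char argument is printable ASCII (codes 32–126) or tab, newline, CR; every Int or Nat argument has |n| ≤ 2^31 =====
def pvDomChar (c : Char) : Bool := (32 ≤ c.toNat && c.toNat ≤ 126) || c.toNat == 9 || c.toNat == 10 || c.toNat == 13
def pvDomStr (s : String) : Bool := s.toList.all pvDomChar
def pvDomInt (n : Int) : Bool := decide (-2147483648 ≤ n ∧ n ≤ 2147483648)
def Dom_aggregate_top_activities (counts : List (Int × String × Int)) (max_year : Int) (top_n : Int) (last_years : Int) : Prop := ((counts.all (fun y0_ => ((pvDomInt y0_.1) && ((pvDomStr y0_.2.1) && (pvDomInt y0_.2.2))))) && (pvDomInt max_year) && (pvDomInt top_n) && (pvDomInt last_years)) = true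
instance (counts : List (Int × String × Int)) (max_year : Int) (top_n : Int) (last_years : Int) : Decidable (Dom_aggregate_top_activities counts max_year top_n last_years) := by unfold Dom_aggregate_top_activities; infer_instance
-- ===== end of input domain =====

-- B inverts A's dataflow (objective: alternative): ordered dedup of the in-window activities,
-- every candidate row materialised up front, totals obtained as row sums instead of by an
-- aggregation pass, and the top n extracted by repeated first-argmax selection instead of sorting.

-- Both ports receive the `counts` argument as a list of (year, activity, count) triples; the Python
-- function receives it as the dict built from those pairs (later value for a repeated key wins, the
-- key keeps its first position).  `pvDictOf` is exactly that dict-construction, shared by both ports.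
def pvDictOf (counts : List (Int × String × Int)) : PySem.Dict (Int × String) Int :=
  counts.foldl (fun d t => d.insert (t.1, t.2.1) t.2.2) PySem.Dict.empty

-- ===== PORT A =====
-- Counter's `activity_totals[activity] += count` is `modify activity 0 (· + count)`;
-- `most_common(top_n)` is the stable descending sort by count, truncated to top_n (empty for top_n ≤ 0,
-- which is `.take top_n.toNat`).
def aggregate_top_activities (counts : List (Int × String × Int)) (max_year : Int) (top_n : Int) (last_years : Int) : List Int × List String × List (List Int) :=
  let start_year := max_year - last_years + 1
  let d := pvDictOf counts
  let activity_totals : PySem.Dict String Int :=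
    d.items.foldl
      (fun t p => if start_year ≤ p.1.1 ∧ p.1.1 ≤ max_year then t.modify p.1.2 0 (· + p.2) else t)
      PySem.Dict.empty
  let top_activities :=
    ((PySem.List.sorted activity_totals.items (fun kv => kv.2) true).take top_n.toNat).map (·.1)
  let years := PySem.List.pyRange start_year (max_year + 1) 1
  let data_matrix := top_activities.map (fun a => years.map (fun y => d.getD (y, a) 0))
  (years, top_activities, data_matrix)

-- ===== PORT B =====
-- `best = pool[0]; for cand in pool[1:]: if best[1] < cand[1]: best = cand`
def pvBest (p : String × Int × List Int) (rest : List (String × Int × List Int)) :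
    String × Int × List Int :=
  rest.foldl (fun best cand => if best.2.1 < cand.2.1 then cand else best) p

-- `while pool and len(top_activities) < top_n: … pool.remove(best)`; each pass removes one element,
-- so the loop is run with fuel = the initial pool length (pool.remove = erase of the first occurrence).
def pvSelLoop (top_n : Int) : Nat → List (String × Int × List Int) →
    List String → List (List Int) → List String × List (List Int)
  | 0, _, top, mat => (top, mat)
  | _ + 1, [], top, mat => (top, mat)
  | fuel + 1, p :: ps, top, mat =>
    if (top.length : Int) < top_n then
      let best := pvBest p ps
      pvSelLoop top_n fuel ((p :: ps).erase best) (top ++ [best.1]) (mat ++ [best.2.2])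
    else (top, mat)

def aggregate_top_activities_alt (counts : List (Int × String × Int)) (max_year : Int) (top_n : Int) (last_years : Int) : List Int × List String × List (List Int) :=
  let start_year := max_year - last_years + 1
  let d := pvDictOf counts
  let years := PySem.List.pyRange start_year (max_year + 1) 1
  -- `for (year, activity) in counts:` iterates the dict's keys; seen is a set, acts a list
  let acts := (d.keys.foldl
      (fun s k =>
        if (start_year ≤ k.1 ∧ k.1 ≤ max_year) ∧ k.2 ∉ s.1 then
          (PySem.Set.add s.1 k.2, s.2 ++ [k.2])
        else s)
      ((PySem.Set.empty : PySem.Set String), ([] : List String))).2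
  let rows := acts.map (fun a => years.map (fun y => d.getD (y, a) 0))
  let totals := rows.map (fun row => row.sum)
  let pool := acts.zip (totals.zip rows)
  let res := pvSelLoop top_n pool.length pool [] []
  (years, res.1, res.2)

-- ===== PRECONDITION & SPEC =====
def Spec_aggregate_top_activities (counts : List (Int × String × Int)) (max_year : Int) (top_n : Int) (last_years : Int) (out : List Int × List String × List (List Int)) : Prop := out = aggregate_top_activities_alt counts max_year top_n last_years
instance (counts : List (Int × String × Int)) (max_year : Int) (top_n : Int) (last_years : Int) (out : List Int × List String × List (List Int)) : Decidable (Spec_aggregate_top_activities counts max_year top_n last_years out) := by unfold Spec_aggregate_top_activities; infer_instance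

-- ===== CLAIM (what is proved, stated in full; the proofs are below) =====
def Claim_equal_aggregate_top_activities : Prop := ∀ (counts : List (Int × String × Int)) (max_year : Int) (top_n : Int) (last_years : Int), Dom_aggregate_top_activities counts max_year top_n last_years → Spec_aggregate_top_activities counts max_year top_n last_years (aggregate_top_activities counts max_year top_n last_years)

-- ===== LEMMAS AND PROOFS =====

-- ---- selection sort block ----

theorem pv_best_mem (p : String × Int × List Int) (rest : List (String × Int × List Int)) :
    pvBest p rest ∈ p :: rest := by
  induction rest generalizing p with
  | nil => simp [pvBest]
  | cons c rest ih =>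
      have h := ih (if p.2.1 < c.2.1 then c else p)
      simp only [pvBest, List.foldl_cons] at *
      rcases List.mem_cons.mp h with h | h
      · rw [h]; split_ifs <;> simp
      · simp [h]

theorem pv_best_max (p : String × Int × List Int) (rest : List (String × Int × List Int)) :
    ∀ q ∈ p :: rest, q.2.1 ≤ (pvBest p rest).2.1 := by
  induction rest generalizing p with
  | nil => intro q hq; simp at hq; simp [pvBest, hq]
  | cons c rest ih =>
      intro q hq
      have step : p.2.1 ≤ (if p.2.1 < c.2.1 then c else p).2.1 ∧
          c.2.1 ≤ (if p.2.1 < c.2.1 then c else p).2.1 := by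
        split_ifs with h <;> constructor <;> omega
      have h := ih (if p.2.1 < c.2.1 then c else p)
      simp only [pvBest, List.foldl_cons] at *
      rcases List.mem_cons.mp hq with hq | hq
      · subst hq
        exact le_trans step.1 (h _ (List.mem_cons_self))
      rcases List.mem_cons.mp hq with hq | hq
      · subst hq
        exact le_trans step.2 (h _ (List.mem_cons_self))
      · exact h q (List.mem_cons_of_mem _ hq)

theorem pv_insertBy_of_head_true {α : Type} (before : α → α → Bool) (x : α) (M : List α)
    (h : ∀ z ∈ M, before x z = true) : PySem.List.insertBy before x M = x :: M := by
  cases M with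
  | nil => rfl
  | cons z zs => simp [PySem.List.insertBy, h z (List.mem_cons_self)]

theorem pv_insertBy_cons_of_false {α : Type} (before : α → α → Bool) (x z : α) (zs : List α)
    (h : before x z = false) :
    PySem.List.insertBy before x (z :: zs) = z :: PySem.List.insertBy before x zs := by
  simp [PySem.List.insertBy, h]

theorem pv_sorted_snoc {α κ : Type} [LT κ] [DecidableLT κ] (L : List α) (x : α) (key : α → κ) :
    PySem.List.sorted (L ++ [x]) key true
      = PySem.List.insertBy (fun a b => decide (key b < key a)) x (PySem.List.sorted L key true) := by
  rw [PySem.List.sorted_rev_eq_foldl_insertBy, PySem.List.sorted_rev_eq_foldl_insertBy,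
    List.foldl_append]
  rfl

theorem pv_sorted_selection_aux (L : List (String × Int × List Int)) :
    ∀ p ps, L = p :: ps →
    PySem.List.sorted L (fun t => t.2.1) true
      = pvBest p ps :: PySem.List.sorted (L.erase (pvBest p ps)) (fun t => t.2.1) true := by
  induction L using List.reverseRecOn with
  | nil => intro p ps h; cases h
  | append_singleton L' x ih =>
    intro p ps h
    cases L' with
    | nil =>
        simp only [List.nil_append, List.cons.injEq] at h
        obtain ⟨hp, hps⟩ := h
        subst hp; subst hps
        simp [pvBest, PySem.List.sorted, PySem.List.insertBy, List.erase_cons_head]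
    | cons q qs =>
        have hp : p = q := by
          simpa using congrArg (fun l => l.headI) h.symm
        have hps : ps = qs ++ [x] := by
          have := congrArg List.tail h.symm
          simpa using this
        subst hp; subst hps
        have hfold : pvBest p (qs ++ [x])
            = if (pvBest p qs).2.1 < x.2.1 then x else pvBest p qs := by
          simp [pvBest, List.foldl_append]
        have hmax := pv_best_max p qs
        by_cases hlt : (pvBest p qs).2.1 < x.2.1
        · -- new element is a strict maximum: it goes in front
          have hx_notmem : x ∉ p :: qs := by
            intro hx
            exact absurd (hmax x hx) (by omega)
          rw [pv_sorted_snoc, pv_insertBy_of_head_true _ _ _ (by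
              intro z hz
              have hz' := (PySem.List.mem_sorted _ _ _ _).mp hz
              have := hmax z hz'
              simp only [decide_eq_true_eq]
              omega)]
          rw [hfold, if_pos hlt]
          rw [List.erase_append_right _ hx_notmem]
          simp
        · rw [pv_sorted_snoc, ih p qs rfl,
            pv_insertBy_cons_of_false _ _ _ _ (by simpa using hlt),
            ← pv_sorted_snoc,
            ← List.erase_append_left [x] (pv_best_mem p qs),
            hfold, if_neg hlt]

theorem pv_selLoop_eq (top_n : Int) (fuel : Nat) : ∀ (pool : List (String × Int × List Int))
    (top : List String) (mat : List (List Int)), pool.length ≤ fuel →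
    pvSelLoop top_n fuel pool top mat
      = (top ++ ((PySem.List.sorted pool (fun t => t.2.1) true).take
            (top_n - top.length).toNat).map (·.1),
         mat ++ ((PySem.List.sorted pool (fun t => t.2.1) true).take
            (top_n - top.length).toNat).map (·.2.2)) := by
  induction fuel with
  | zero =>
      intro pool top mat hlen
      have : pool = [] := List.eq_nil_of_length_eq_zero (Nat.le_zero.mp hlen)
      subst this
      simp [pvSelLoop, show PySem.List.sorted ([] : List (String × Int × List Int)) (fun t => t.2.1) true = [] from rfl]
  | succ fuel ih =>
      intro pool top mat hlen
      cases pool with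
      | nil => simp [pvSelLoop, show PySem.List.sorted ([] : List (String × Int × List Int)) (fun t => t.2.1) true = [] from rfl]
      | cons p ps =>
          rw [pvSelLoop]
          split_ifs with hcond
          · have hmem := pv_best_mem p ps
            have hlen' : ((p :: ps).erase (pvBest p ps)).length ≤ fuel := by
              rw [List.length_erase_of_mem hmem]
              simp at hlen ⊢
              omega
            rw [ih _ _ _ hlen']
            rw [pv_sorted_selection_aux (p :: ps) p ps rfl]
            have harith : (top_n - top.length).toNat
                = (top_n - (top ++ [(pvBest p ps).1]).length).toNat + 1 := by
              simp only [List.length_append, List.length_cons, List.length_nil]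
              omega
            rw [harith, List.take_succ_cons]
            simp only [List.map_cons, List.length_append]
            simp
          · have : (top_n - top.length).toNat = 0 := by omega
            simp [this]

theorem pv_insertBy_map (x : String × Int × List Int) (M : List (String × Int × List Int)) :
    PySem.List.insertBy (fun a b => decide ((b : String × Int).2 < a.2)) (x.1, x.2.1)
        (M.map (fun t => (t.1, t.2.1)))
      = (PySem.List.insertBy (fun a b => decide (b.2.1 < a.2.1)) x M).map (fun t => (t.1, t.2.1)) := by
  induction M with
  | nil => rfl
  | cons z zs ih =>
      by_cases h : z.2.1 < x.2.1
      · simp [PySem.List.insertBy, h]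
      · rw [List.map_cons,
          pv_insertBy_cons_of_false _ _ _ _ (by simpa using h),
          pv_insertBy_cons_of_false _ _ _ _ (by simpa using h), ih, List.map_cons]

theorem pv_sorted_map (L : List (String × Int × List Int)) :
    PySem.List.sorted (L.map (fun t => (t.1, t.2.1))) (fun kv => kv.2) true
      = (PySem.List.sorted L (fun t => t.2.1) true).map (fun t => (t.1, t.2.1)) := by
  induction L using List.reverseRecOn with
  | nil => rfl
  | append_singleton L x ih =>
      rw [List.map_append, List.map_singleton, pv_sorted_snoc, pv_sorted_snoc, ih,
        pv_insertBy_map]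

-- ---- A- and B-side characterisation ----


theorem pv_getD_modify_fold (l : List ((Int × String) × Int)) : ∀ (t0 : PySem.Dict String Int)
    (a : String),
    (l.foldl (fun t p => t.modify p.1.2 0 (· + p.2)) t0).getD a 0
      = t0.getD a 0 + ((l.filter (fun p => p.1.2 == a)).map (·.2)).sum := by
  induction l with
  | nil => intro t0 a; simp
  | cons x l ih =>
      intro t0 a
      rw [List.foldl_cons, ih]
      by_cases h : x.1.2 = a
      · rw [List.filter_cons_of_pos (by simpa using h)]
        rw [PySem.Dict.getD_modify, if_pos h.symm, h]
        simp
        omega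
      · rw [List.filter_cons_of_neg (by simpa using h)]
        rw [PySem.Dict.getD_modify, if_neg (fun he => h he.symm)]

theorem pv_acts_fold (s m : Int) (l : List (Int × String)) : ∀ (seen : PySem.Set String),
    l.foldl
      (fun st k =>
        if (s ≤ k.1 ∧ k.1 ≤ m) ∧ k.2 ∉ st.1 then (PySem.Set.add st.1 k.2, st.2 ++ [k.2]) else st)
      (seen, (seen : List String))
      = (PySem.Set.update seen ((l.filter (fun k => decide (s ≤ k.1 ∧ k.1 ≤ m))).map (·.2)),
         PySem.Set.update seen ((l.filter (fun k => decide (s ≤ k.1 ∧ k.1 ≤ m))).map (·.2))) := by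
  induction l with
  | nil => intro seen; simp [PySem.Set.update]
  | cons k l ih =>
      intro seen
      rw [List.foldl_cons]
      by_cases hw : s ≤ k.1 ∧ k.1 ≤ m
      · rw [List.filter_cons_of_pos (by simpa using hw), List.map_cons]
        by_cases hmem : k.2 ∈ seen
        · rw [if_neg (by simp [hmem])]
          rw [ih seen]
          rw [show PySem.Set.update seen (k.2 :: _) = PySem.Set.update (PySem.Set.add seen k.2) _ from rfl,
            PySem.Set.add_of_mem hmem]
        · rw [if_pos ⟨hw, hmem⟩]
          rw [PySem.Set.add_of_not_mem hmem]
          rw [ih (seen ++ [k.2])]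
          rw [show PySem.Set.update seen (k.2 :: _) = PySem.Set.update (PySem.Set.add seen k.2) _ from rfl,
            PySem.Set.add_of_not_mem hmem]
      · rw [if_neg (by simp [hw]), List.filter_cons_of_neg (by simpa using hw)]
        exact ih seen

theorem pv_rowsum (s m : Int) (l : List ((Int × String) × Int)) (hnd : (l.map (·.1)).Nodup)
    (ys : List Int) (hys : ys.Nodup) (hmem : ∀ y, y ∈ ys ↔ s ≤ y ∧ y ≤ m) (a : String) :
    (ys.map (fun y => (PySem.Dict.mk l).getD (y, a) 0)).sum
      = ((l.filter (fun p => decide (s ≤ p.1.1 ∧ p.1.1 ≤ m) && (p.1.2 == a))).map (·.2)).sum := by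
  induction l with
  | nil => simp [PySem.Dict.getD_eq_get?_getD, PySem.Dict.get?]
  | cons x l ih =>
      simp only [List.map_cons, List.nodup_cons] at hnd
      have hcons : ∀ y : Int, (PySem.Dict.mk (x :: l)).getD (y, a) 0
          = if x.1 == (y, a) then x.2 else (PySem.Dict.mk l).getD (y, a) 0 := by
        intro y
        rw [PySem.Dict.getD_eq_get?_getD]
        cases x with
        | mk xk xv =>
          rw [PySem.Dict.get?_mk_cons]
          split_ifs with h
          · simp
          · simp [PySem.Dict.getD_eq_get?_getD]
      by_cases hpass : (s ≤ x.1.1 ∧ x.1.1 ≤ m) ∧ x.1.2 = a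
      · -- x contributes: split ys at x.1.1
        have hkey : x.1 = (x.1.1, a) := Prod.ext_iff.mpr ⟨rfl, hpass.2⟩
        have hyin : x.1.1 ∈ ys := (hmem x.1.1).mpr hpass.1
        obtain ⟨u, v, huv⟩ := List.append_of_mem hyin
        subst huv
        have hnotu : x.1.1 ∉ u ∧ x.1.1 ∉ v := by
          have h1 := List.Nodup.of_append_right hys
          have h2 := List.disjoint_of_nodup_append hys
          exact ⟨fun hu => h2 hu (by simp), (List.nodup_cons.mp h1).1⟩
        have hg0 : (PySem.Dict.mk l).getD (x.1.1, a) 0 = 0 := by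
          apply PySem.Dict.getD_of_get?_eq_none
          rw [PySem.Dict.get?_eq_none_iff_not_mem_keys, PySem.Dict.keys_mk]
          rw [← hkey]
          exact hnd.1
        have hcongr : ∀ w : List Int, x.1.1 ∉ w →
            (w.map (fun y => (PySem.Dict.mk (x :: l)).getD (y, a) 0))
              = (w.map (fun y => (PySem.Dict.mk l).getD (y, a) 0)) := by
          intro w hw
          apply List.map_congr_left
          intro y hy
          rw [hcons y, if_neg]
          simp only [beq_iff_eq]
          intro he
          have h1 : x.1.1 = y := congrArg Prod.fst he
          exact hw (by rw [h1]; exact hy)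
        have hif : (x.1 == (x.1.1, a)) = true := beq_iff_eq.mpr hkey
        rw [List.filter_cons_of_pos (by simp [hpass.1, hpass.2]), List.map_cons, List.sum_cons]
        rw [List.map_append, List.map_cons, List.sum_append, List.sum_cons,
          hcongr u hnotu.1, hcongr v hnotu.2, hcons x.1.1, if_pos hif]
        have hih := ih hnd.2
        rw [List.map_append, List.map_cons, List.sum_append, List.sum_cons, hg0] at hih
        omega
      · -- x never matches any (y, a) with y ∈ ys
        have hfalse : ∀ y ∈ ys, ¬ (x.1 == (y, a)) = true := by
          intro y hy
          simp only [beq_iff_eq]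
          intro he
          have h1 : x.1.1 = y := congrArg Prod.fst he
          have h2 : x.1.2 = a := congrArg Prod.snd he
          exact hpass ⟨by rw [h1]; exact ((hmem y).mp hy), h2⟩
        rw [List.filter_cons_of_neg (by
          simp only [Bool.and_eq_true, decide_eq_true_eq, beq_iff_eq]
          tauto)]
        rw [List.map_congr_left (fun y hy => by rw [hcons y, if_neg (hfalse y hy)])]
        exact ih hnd.2

theorem pv_foldA_filter (s m : Int) (l : List ((Int × String) × Int))
    (t0 : PySem.Dict String Int) :
    l.foldl (fun t p => if s ≤ p.1.1 ∧ p.1.1 ≤ m then t.modify p.1.2 0 (· + p.2) else t) t0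
      = (l.filter (fun p => decide (s ≤ p.1.1 ∧ p.1.1 ≤ m))).foldl
          (fun t p => t.modify p.1.2 0 (· + p.2)) t0 := by
  rw [List.foldl_filter]
  simp

theorem pv_zip_self_map {A B : Type} (l : List A) (h : A → B) :
    l.zip (l.map h) = l.map (fun a => (a, h a)) := by
  induction l with
  | nil => rfl
  | cons x l ih => simp [ih]

theorem pv_nodup_keys_pvDictOf (counts : List (Int × String × Int)) :
    (pvDictOf counts).keys.Nodup :=
  PySem.Dict.nodup_keys_foldl_insert_key counts (fun t => (t.1, t.2.1)) (fun _ t => t.2.2)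
    PySem.Dict.empty (by simp)

-- ===== VERDICT (by name: the statement is the Claim_ definition above) =====
theorem aggregate_top_activities_spec : Claim_equal_aggregate_top_activities := by
  intro counts max_year top_n last_years _
  unfold Spec_aggregate_top_activities
  unfold aggregate_top_activities aggregate_top_activities_alt
  dsimp only
  rw [pv_foldA_filter]
  set s := max_year - last_years + 1 with hs
  set d := pvDictOf counts with hd
  set years := PySem.List.pyRange s (max_year + 1) 1 with hyears
  set M := d.items.filter (fun p => decide (s ≤ p.1.1 ∧ p.1.1 ≤ max_year)) with hM
  set T := M.foldl (fun t p => t.modify p.1.2 0 (· + p.2)) PySem.Dict.empty with hT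
  set acts := (d.keys.foldl
      (fun st k =>
        if (s ≤ k.1 ∧ k.1 ≤ max_year) ∧ k.2 ∉ st.1 then
          (PySem.Set.add st.1 k.2, st.2 ++ [k.2])
        else st)
      ((PySem.Set.empty : PySem.Set String), ([] : List String))).2 with hacts0
  set pool := acts.zip (((acts.map (fun a => years.map (fun y => d.getD (y, a) 0))).map
      (fun row => row.sum)).zip (acts.map (fun a => years.map (fun y => d.getD (y, a) 0)))) with hpool0
  -- years facts
  have hkeysnd : d.keys.Nodup := pv_nodup_keys_pvDictOf counts
  have hysnd : years.Nodup := PySem.List.nodup_pyRange_one _ _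
  have hysmem : ∀ y, y ∈ years ↔ s ≤ y ∧ y ≤ max_year := by
    intro y
    rw [hyears, PySem.List.mem_pyRange_one]
    omega
  -- the totals dict: keys and values
  have hTkeys : T.keys = PySem.Set.ofList (M.map (fun p => p.1.2)) := by
    have h := PySem.Dict.keys_foldl_modify_key M (fun p => p.1.2) 0
      (fun _ p => (· + p.2)) PySem.Dict.empty
    rw [PySem.Dict.keys_empty, PySem.Set.update_nil_left] at h
    exact h
  have hTnodup : T.keys.Nodup := PySem.Dict.nodup_keys_foldl_modify_key M (fun p => p.1.2) 0
      (fun _ p => (· + p.2)) PySem.Dict.empty (by simp)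
  have hTval : ∀ a, T.getD a 0
      = (years.map (fun y => d.getD (y, a) 0)).sum := by
    intro a
    rw [hT, pv_getD_modify_fold M PySem.Dict.empty a, PySem.Dict.getD_empty, zero_add]
    rw [hM, List.filter_filter]
    rw [show (fun p : (Int × String) × Int => (p.1.2 == a) && decide (s ≤ p.1.1 ∧ p.1.1 ≤ max_year))
        = (fun p => decide (s ≤ p.1.1 ∧ p.1.1 ≤ max_year) && (p.1.2 == a)) from by
      funext p; exact Bool.and_comm _ _]
    rw [← pv_rowsum s max_year d.items (by
        have : d.items.map (fun p => p.1) = d.keys := rfl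
        rw [this]; exact hkeysnd) years hysnd hysmem a]
  -- acts = keys of the totals dict
  have hacts : acts = PySem.Set.ofList
      ((d.keys.filter (fun k => decide (s ≤ k.1 ∧ k.1 ≤ max_year))).map (fun k => k.2)) := by
    have h := pv_acts_fold s max_year d.keys []
    rw [PySem.Set.update_nil_left] at h
    rw [hacts0]
    exact congrArg Prod.snd h
  have hactskeys : acts = T.keys := by
    rw [hacts, hTkeys, hM]
    rw [show d.keys = d.items.map (fun p => p.1) from rfl, List.filter_map, List.map_map]
    rfl
  -- the pool in closed form
  have hpool : pool = acts.map (fun a =>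
      (a, (years.map (fun y => d.getD (y, a) 0)).sum, years.map (fun y => d.getD (y, a) 0))) := by
    rw [hpool0, List.map_map, List.zip_map', pv_zip_self_map]
    rfl
  -- A's sorted items are the pool projected to (activity, total)
  have hTitems : T.items = pool.map (fun t => (t.1, t.2.1)) := by
    rw [PySem.Dict.items_eq_map_keys T hTnodup 0, hpool, List.map_map, ← hactskeys]
    apply List.map_congr_left
    intro a _
    rw [hTval a]
    rfl
  -- run the selection loop
  have hsel := pv_selLoop_eq top_n pool.length pool [] [] (le_refl _)
  simp only [List.length_nil, Nat.cast_zero, sub_zero] at hsel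
  rw [hsel]
  refine Prod.ext rfl (Prod.ext ?_ ?_)
  · rw [hTitems, pv_sorted_map, ← List.map_take, List.map_map]
    rfl
  · rw [hTitems, pv_sorted_map, ← List.map_take, List.map_map, List.map_map]
    apply List.map_congr_left
    intro t ht
    have htpool : t ∈ pool := (PySem.List.mem_sorted _ _ _ _).mp (List.mem_of_mem_take ht)
    rw [hpool] at htpool
    obtain ⟨a, ha, rfl⟩ := List.mem_map.mp htpool
    rfl
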